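-- pv_equiv track=rewrite | github.com/v2okimochi/Keasy | WindowGUI.py | transStringForPywinauto
-- ===== SOURCE A (Python) =====
-- def transStringForPywinauto(text) -> str:
--     check = '~!@#$%^&*()_+{}|:"<>?'  # 比較する記号群
--     translated = ''
--     # 記号にだけ{}をつける：例えば'f$7%' => 'f{$}7{%}'
--     for i in text:
--         match = False
--         for j in check:
--             if i == j:
--                 match = True
--         if match:
--             translated = ''.join([translated, '{' + i + '}'])
--         else:
--             translated = ''.join([translated, i])
--     return translated
-- ===== SOURCE B (Python) =====
-- SYMBOLS = frozenset('~!@#$%^&*()_+{}|:"<>?')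
--
-- def transStringForPywinauto(text) -> str:
--     # run-based: copy whole runs of plain characters as slices, wrap symbols
--     pieces = []
--     start = 0
--     for i, c in enumerate(text):
--         if c in SYMBOLS:
--             if start < i:
--                 pieces.append(text[start:i])
--             pieces.append('{' + c + '}')
--             start = i + 1
--     pieces.append(text[start:])
--     return ''.join(pieces)
-- ===== Notes on version B (the rewrite author's own statement) =====
-- stated objective: faster
-- what changed: Replaces A's char-by-char string accumulation with an inner scan over the symbol string by a run-based single pass: it tracks the start of the current plain run, flushes whole runs as slices when a symbol (set membership) is hit, and joins the collected pieces once.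
import Mathlib
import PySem

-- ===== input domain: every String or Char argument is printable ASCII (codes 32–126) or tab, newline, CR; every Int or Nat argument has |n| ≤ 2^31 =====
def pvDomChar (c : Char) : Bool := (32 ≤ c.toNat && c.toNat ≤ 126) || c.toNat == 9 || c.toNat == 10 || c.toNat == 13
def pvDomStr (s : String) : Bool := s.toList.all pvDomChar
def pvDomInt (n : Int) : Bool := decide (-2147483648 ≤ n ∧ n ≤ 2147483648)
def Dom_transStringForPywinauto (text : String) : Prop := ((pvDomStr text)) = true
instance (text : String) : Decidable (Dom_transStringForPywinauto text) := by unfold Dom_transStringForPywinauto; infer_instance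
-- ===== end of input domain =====

-- B replaces A's char-by-char accumulation (with an inner scan over the symbol string)
-- by a run-based pass: plain characters are copied as whole slices between symbol
-- positions, and only symbols are wrapped; pieces are joined once at the end.

-- ===== PORT A =====
-- strings held as List Char; ''.join([translated, x]) is translated ++ x
def transStringForPywinauto (text : String) : String :=
  let check : List Char := "~!@#$%^&*()_+{}|:\"<>?".toList
  let translated : List Char :=
    text.toList.foldl (fun translated i =>
      let m := check.foldl (fun m j => if i == j then true else m) false
      if m then translated ++ ('{' :: i :: ['}']) else translated ++ [i]) []
  String.ofList translated

-- ===== PORT B =====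
-- frozenset('~!@#$%^&*()_+{}|:"<>?')
def pvSymbols : PySem.Set Char := PySem.Set.ofList "~!@#$%^&*()_+{}|:\"<>?".toList

-- run-based: for i, c in enumerate(text): on a symbol flush text[start:i], append '{c}';
-- at the end flush text[start:]; join the pieces
def transStringForPywinauto_alt (text : String) : String :=
  let cs := text.toList
  let st : List (List Char) × Int :=
    (PySem.List.enumerate cs 0).foldl (fun (s : List (List Char) × Int) ic =>
      if PySem.Set.contains pvSymbols ic.2 then
        let pieces := if s.2 < ic.1 then s.1 ++ [PySem.List.slice cs (some s.2) (some ic.1)] else s.1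
        (pieces ++ [['{', ic.2, '}']], ic.1 + 1)
      else s) ([], 0)
  String.ofList ((st.1 ++ [PySem.List.slice cs (some st.2) none]).flatten)

-- ===== PRECONDITION & SPEC =====
def Spec_transStringForPywinauto (text : String) (out : String) : Prop := out = transStringForPywinauto_alt text
instance (text : String) (out : String) : Decidable (Spec_transStringForPywinauto text out) := by unfold Spec_transStringForPywinauto; infer_instance

-- ===== CLAIM (what is proved, stated in full; the proofs are below) =====
def Claim_equal_transStringForPywinauto : Prop := ∀ (text : String), Dom_transStringForPywinauto text → Spec_transStringForPywinauto text (transStringForPywinauto text)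

-- ===== LEMMAS AND PROOFS =====

-- the per-character translation both programs realise
def pvF (c : Char) : List Char :=
  if ("~!@#$%^&*()_+{}|:\"<>?".toList).contains c then ['{', c, '}'] else [c]

-- A's inner match loop computes membership in the symbol list
theorem pv_match_eq_contains (c : Char) (l : List Char) (b : Bool) :
    l.foldl (fun m j => if c == j then true else m) b = (b || l.contains c) := by
  induction l generalizing b with
  | nil => simp
  | cons x xs ih =>
      simp only [List.foldl_cons, List.contains_cons, ih]
      by_cases h : c = x
      · simp [h]
      · rw [show (c == x) = false from beq_eq_false_iff_ne.mpr h]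
        simp

-- A is the concatenation of the per-character translations
theorem pv_A_eq (text : String) :
    transStringForPywinauto text = String.ofList (text.toList.flatMap pvF) := by
  unfold transStringForPywinauto
  have hf : (fun (translated : List Char) (i : Char) =>
      let m := ("~!@#$%^&*()_+{}|:\"<>?".toList).foldl (fun m j => if i == j then true else m) false
      if m then translated ++ ('{' :: i :: ['}']) else translated ++ [i])
      = fun translated i => translated ++ pvF i := by
    funext t i
    show (if ("~!@#$%^&*()_+{}|:\"<>?".toList).foldl (fun m j => if i == j then true else m) false
          then t ++ ('{' :: i :: ['}']) else t ++ [i]) = _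
    rw [pv_match_eq_contains, Bool.false_or, ← apply_ite (t ++ ·)]
    unfold pvF
    rfl
  simp only [hf, PySem.List.foldl_append_eq_flatMap, List.nil_append]

-- B's symbol test agrees with A's membership test
theorem pv_contains_eq (c : Char) :
    PySem.Set.contains pvSymbols c = ("~!@#$%^&*()_+{}|:\"<>?".toList).contains c := by
  have h : pvSymbols = "~!@#$%^&*()_+{}|:\"<>?".toList := by decide
  rw [h]
  simp [PySem.Set.contains]

-- B's loop body, named for the induction
def pvStep (cs : List Char) (s : List (List Char) × Int) (ic : Int × Char) : List (List Char) × Int :=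
  if PySem.Set.contains pvSymbols ic.2 then
    let pieces := if s.2 < ic.1 then s.1 ++ [PySem.List.slice cs (some s.2) (some ic.1)] else s.1
    (pieces ++ [['{', ic.2, '}']], ic.1 + 1)
  else s

-- loop invariant: pieces flattened plus the pending run equal the translated prefix
theorem pv_loop (cs : List Char) :
    ∀ (t : List Char) (k : Nat) (P : List (List Char)) (s : Nat),
      s ≤ k → List.drop k cs = t →
      P.flatten ++ (cs.drop s).take (k - s) = (cs.take k).flatMap pvF →
      (( (PySem.List.enumerate t (k : Int)).foldl (pvStep cs) (P, (s : Int)) ).1.flatten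
        ++ PySem.List.slice cs (some (((PySem.List.enumerate t (k : Int)).foldl (pvStep cs) (P, (s : Int))).2)) none)
        = cs.flatMap pvF := by
  intro t
  induction t with
  | nil =>
      intro k P s hsk hdrop hinv
      simp only [PySem.List.enumerate_nil, List.foldl_nil]
      have hk : cs.length ≤ k := by
        by_contra h
        push_neg at h
        have := List.drop_eq_nil_iff.mp hdrop
        omega
      have htake : cs.take k = cs := List.take_of_length_le hk
      have htk : (cs.drop s).take (k - s) = cs.drop s := by
        apply List.take_of_length_le
        simp [List.length_drop]; omega
      rw [PySem.List.slice_from_natCast]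
      rw [htake, htk] at hinv
      exact hinv
  | cons c t' ih =>
      intro k P s hsk hdrop hinv
      have hget : cs[k]? = some c := by
        have h0 : (List.drop k cs)[0]? = some c := by rw [hdrop]; rfl
        rwa [List.getElem?_drop, Nat.add_zero] at h0
      have htake_succ : cs.take (k + 1) = cs.take k ++ [c] := by
        rw [List.take_succ, hget]; rfl
      have hdrop' : List.drop (k + 1) cs = t' := by
        have h1 := congrArg List.tail hdrop
        rwa [List.tail_drop] at h1
      have hcast : (k : Int) + 1 = ((k + 1 : Nat) : Int) := by push_cast; ring
      rw [PySem.List.enumerate_cons, List.foldl_cons]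
      by_cases hc : PySem.Set.contains pvSymbols c = true
      · -- symbol: flush the pending run, wrap c, start := k+1
        have hfc : pvF c = ['{', c, '}'] := by
          unfold pvF
          rw [if_pos (by rw [← pv_contains_eq]; exact hc)]
        have hstep : pvStep cs (P, (s : Int)) ((k : Int), c)
            = ((if (s : Int) < (k : Int) then P ++ [PySem.List.slice cs (some (s : Int)) (some (k : Int))] else P)
                ++ [['{', c, '}']], (k : Int) + 1) := by
          simp only [pvStep]
          rw [if_pos hc]
        rw [hstep, hcast]
        apply ih (k + 1) _ (k + 1) (Nat.le_refl _) hdrop'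
        have hflat : ((if (s : Int) < (k : Int) then P ++ [PySem.List.slice cs (some (s : Int)) (some (k : Int))] else P)
                ++ [['{', c, '}']]).flatten = P.flatten ++ (cs.drop s).take (k - s) ++ ['{', c, '}'] := by
          by_cases hlt : s < k
          · rw [if_pos (by exact_mod_cast hlt), PySem.List.slice_natCast]
            simp
          · have hse : s = k := by omega
            rw [if_neg (by exact_mod_cast hlt)]
            subst hse
            simp
        rw [hflat, htake_succ, List.flatMap_append, ← hinv]
        simp [hfc]
      · -- plain character: state unchanged, the pending run grows by c
        have hstep : pvStep cs (P, (s : Int)) ((k : Int), c) = (P, (s : Int)) := by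
          simp only [pvStep]
          rw [if_neg hc]
        rw [hstep, hcast]
        apply ih (k + 1) P s (by omega) hdrop'
        have hrun : (cs.drop s).take (k + 1 - s) = (cs.drop s).take (k - s) ++ [c] := by
          have h2 : k + 1 - s = (k - s) + 1 := by omega
          rw [h2, List.take_succ]
          have h3 : (cs.drop s)[k - s]? = some c := by
            rw [List.getElem?_drop]
            have h4 : s + (k - s) = k := by omega
            rw [h4, hget]
          rw [h3]; rfl
        have hfc : pvF c = [c] := by
          unfold pvF
          rw [if_neg (by rw [← pv_contains_eq]; simpa using hc)]
        rw [hrun, htake_succ, List.flatMap_append, ← hinv]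
        simp [hfc]

-- ===== VERDICT (by name: the statement is the Claim_ definition above) =====
theorem transStringForPywinauto_spec : Claim_equal_transStringForPywinauto := by
  intro text _
  unfold Spec_transStringForPywinauto
  rw [pv_A_eq]
  have h := pv_loop text.toList text.toList 0 [] 0 (Nat.le_refl 0) rfl (by simp)
  simp only [Nat.cast_zero] at h
  show String.ofList (text.toList.flatMap pvF) = String.ofList
    ((((PySem.List.enumerate text.toList 0).foldl (pvStep text.toList) ([], 0)).1
      ++ [PySem.List.slice text.toList
            (some ((PySem.List.enumerate text.toList 0).foldl (pvStep text.toList) ([], 0)).2) none]).flatten)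
  rw [← h]
  simp
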